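-- pv_equiv track=rewrite | github.com/sarthaktiwary12/OpenPico4UltraCapture | local_view/reality_check_all_streams.py | frame_gaps
-- ===== SOURCE A (Python) =====
-- def frame_gaps(frames):
--     if not frames:
--         return 0
--     fs = sorted(set(frames))
--     missing = 0
--     for a, b in zip(fs, fs[1:]):
--         if b > a + 1:
--             missing += b - a - 1
--     return missing
-- ===== SOURCE B (Python) =====
-- def frame_gaps(frames):
--     # simpler/faster: telescoping sum — (max - min) minus (distinct_count - 1)
--     if not frames:
--         return 0
--     s = set(frames)
--     return max(s) - min(s) - (len(s) - 1)
-- ===== Notes on version B (the rewrite author's own statement) =====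
-- stated objective: faster
-- what changed: Replaces sort-then-scan over consecutive distinct values by the telescoping closed form max(set)-min(set)-(len(set)-1) computed from a single set build.
import Mathlib
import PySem

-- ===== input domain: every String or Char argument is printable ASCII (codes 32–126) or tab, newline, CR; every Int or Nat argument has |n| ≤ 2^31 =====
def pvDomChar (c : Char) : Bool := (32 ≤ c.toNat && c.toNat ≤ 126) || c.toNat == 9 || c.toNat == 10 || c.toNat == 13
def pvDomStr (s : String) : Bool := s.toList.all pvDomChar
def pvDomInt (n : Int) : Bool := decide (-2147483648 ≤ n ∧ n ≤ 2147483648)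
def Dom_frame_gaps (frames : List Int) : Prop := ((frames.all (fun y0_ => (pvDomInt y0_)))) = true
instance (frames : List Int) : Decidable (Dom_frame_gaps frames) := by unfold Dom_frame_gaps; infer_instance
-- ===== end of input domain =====

-- B replaces A's sort-then-scan over consecutive distinct values by the closed form
-- max(set) - min(set) - (len(set) - 1); a timing run reports the speed difference.

-- ===== PORT A =====
def frame_gaps (frames : List Int) : Int :=
  if frames = [] then 0
  else
    let fs := PySem.List.sorted (PySem.Set.ofList frames) (fun x => x) false
    (fs.zip (PySem.List.slice fs (some 1) none)).foldl
      (fun missing p => if p.2 > p.1 + 1 then missing + (p.2 - p.1 - 1) else missing) 0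

-- ===== PORT B =====
def frame_gaps_alt (frames : List Int) : Int :=
  if frames = [] then 0
  else
    let s := PySem.Set.ofList frames
    (PySem.List.max? s (fun x => x)).getD 0 - (PySem.List.min? s (fun x => x)).getD 0
      - (PySem.Set.len s - 1)

-- ===== PRECONDITION & SPEC =====
def Spec_frame_gaps (frames : List Int) (out : Int) : Prop := out = frame_gaps_alt frames
instance (frames : List Int) (out : Int) : Decidable (Spec_frame_gaps frames out) := by unfold Spec_frame_gaps; infer_instance

-- ===== CLAIM (what is proved, stated in full; the proofs are below) =====
def Claim_equal_frame_gaps : Prop := ∀ (frames : List Int), Dom_frame_gaps frames → Spec_frame_gaps frames (frame_gaps frames)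

-- ===== LEMMAS AND PROOFS =====

-- Telescoping: A's gap loop over a strictly increasing x :: t sums to last - x - |t|.
theorem gap_loop_telescope (t : List Int) (x acc : Int)
    (h : (x :: t).Pairwise (· < ·)) :
    ((x :: t).zip t).foldl
      (fun missing p => if p.2 > p.1 + 1 then missing + (p.2 - p.1 - 1) else missing) acc
      = acc + ((x :: t).getLast (by simp) - x - t.length) := by
  induction t generalizing x acc with
  | nil => simp
  | cons y t' ih =>
    have hxy : x < y := (List.pairwise_cons.mp h).1 y (by simp)
    have h' : (y :: t').Pairwise (· < ·) := (List.pairwise_cons.mp h).2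
    have hstep : (if y > x + 1 then acc + (y - x - 1) else acc) = acc + (y - x - 1) := by
      split_ifs with hc <;> omega
    simp only [List.zip_cons_cons, List.foldl_cons, hstep]
    rw [ih y (acc + (y - x - 1)) h']
    have : (y :: t').getLast (by simp) = (x :: y :: t').getLast (by simp) := by
      simp [List.getLast_cons]
    rw [this]
    simp only [List.length_cons]
    push_cast
    ring

-- In a strictly increasing list, every element is ≤ the last.
theorem le_getLast_of_pairwise_lt (l : List Int) (hl : l ≠ [])
    (h : l.Pairwise (· < ·)) : ∀ y ∈ l, y ≤ l.getLast hl := by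
  induction l with
  | nil => simp at hl
  | cons x t ih =>
    intro y hy
    cases t with
    | nil => simp at hy; simp [hy]
    | cons z t' =>
      rw [List.getLast_cons (by simp)]
      rcases List.mem_cons.mp hy with rfl | hyt
      · exact le_of_lt (lt_of_lt_of_le ((List.pairwise_cons.mp h).1 _ (List.getLast_mem _))
          (le_refl _))
      · exact ih (by simp) (List.pairwise_cons.mp h).2 y hyt

theorem frame_gaps_spec : Claim_equal_frame_gaps := by
  intro frames _
  unfold Spec_frame_gaps frame_gaps frame_gaps_alt
  by_cases hemp : frames = []
  · simp [hemp]
  · simp only [if_neg hemp]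
    set s := PySem.Set.ofList frames with hs
    set fs := PySem.List.sorted s (fun x => x) false with hfs
    have hfsne : fs ≠ [] := by
      rw [hfs, Ne, PySem.List.sorted_eq_nil_iff]
      intro h0
      rcases List.exists_mem_of_ne_nil frames hemp with ⟨a, ha⟩
      have : a ∈ s := (PySem.Set.mem_ofList frames a).mpr ha
      rw [h0] at this; simp at this
    have hpw : fs.Pairwise (· < ·) := PySem.List.sorted_ofList_pairwise_lt frames
    have hperm : fs.Perm s := PySem.List.sorted_perm s (fun x => x) false
    obtain ⟨x, t, hxt⟩ := List.exists_cons_of_ne_nil hfsne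
    -- A's value
    rw [PySem.List.slice_from_one]
    rw [hxt] at hpw ⊢
    simp only [List.tail_cons]
    rw [gap_loop_telescope t x 0 hpw, zero_add]
    -- B's side: max? and min? are determined
    have hMne : PySem.List.max? s (fun x => x) ≠ none := by
      rw [Ne, PySem.List.max?_eq_none_iff]
      intro h0; rw [h0] at hperm; rw [List.perm_nil] at hperm; rw [hperm] at hxt; simp at hxt
    obtain ⟨M, hM⟩ := Option.ne_none_iff_exists'.mp hMne
    have hmne : PySem.List.min? s (fun x => x) ≠ none := by
      rw [Ne, PySem.List.min?_eq_none_iff]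
      intro h0; rw [h0] at hperm; rw [List.perm_nil] at hperm; rw [hperm] at hxt; simp at hxt
    obtain ⟨m, hm⟩ := Option.ne_none_iff_exists'.mp hmne
    have hmemfs : ∀ y, y ∈ s ↔ y ∈ (x :: t) := by
      intro y; rw [← hxt]; exact (hperm.mem_iff).symm
    -- M is the last of fs, m is the head
    have hlast_mem : (x :: t).getLast (by simp) ∈ (x :: t) := List.getLast_mem _
    have hMle : M ≤ (x :: t).getLast (by simp) := by
      have hMfs : M ∈ (x :: t) := (hmemfs M).mp (PySem.List.max?_mem hM)
      exact le_getLast_of_pairwise_lt _ (by simp) hpw M hMfs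
    have hleM : (x :: t).getLast (by simp) ≤ M :=
      PySem.List.max?_isMax hM _ ((hmemfs _).mpr hlast_mem)
    have hMeq : M = (x :: t).getLast (by simp) := le_antisymm hMle hleM
    have hxle : x ≤ m := by
      have hmfs : m ∈ (x :: t) := (hmemfs m).mp (PySem.List.min?_mem hm)
      rcases List.mem_cons.mp hmfs with rfl | hmt
      · exact le_refl _
      · exact le_of_lt ((List.pairwise_cons.mp hpw).1 m hmt)
    have hmlex : m ≤ x := PySem.List.min?_isMin hm x ((hmemfs x).mpr (by simp))
    have hmeq : m = x := le_antisymm hmlex hxle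
    -- lengths
    have hlen : PySem.Set.len s = (t.length : Int) + 1 := by
      have h1 : s.length = (x :: t).length := by rw [← hxt]; exact hperm.length_eq.symm
      simp [PySem.Set.len, h1]
    rw [hM, hm, hMeq, hmeq, hlen]
    simp only [Option.getD_some]
    ring
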